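-- pv_equiv track=rewrite | github.com/aadyagoel2009/primes-24-models | base_graphofdocs.py | create_word_graph
-- ===== SOURCE A (Python) =====
-- def create_word_graph(terms):
--     word_graph = {}
--     for i in range(len(terms) - 1):
--         term1, term2 = terms[i], terms[i + 1]
--         if term1 not in word_graph:
--             word_graph[term1] = []
--         if term2 not in word_graph:
--             word_graph[term2] = []
--         word_graph[term1].append(term2)
--         word_graph[term2].append(term1)
--     return word_graph
-- ===== SOURCE B (Python) =====
-- def create_word_graph(terms):
--     if len(terms) < 2:
--         return {}
--     graph = {}
--     for w in dict.fromkeys(terms):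
--         nbrs = []
--         for a, b in zip(terms, terms[1:]):
--             if a == w:
--                 nbrs.append(b)
--             if b == w:
--                 nbrs.append(a)
--         graph[w] = nbrs
--     return graph
-- ===== Notes on version B (the rewrite author's own statement) =====
-- stated objective: alternative
-- what changed: Replaces A's edge-centric single pass (one dict mutation per consecutive pair, appending both directions as it goes) with a key-centric construction: first dedupe the words in first-occurrence order, then for each distinct word gather its whole adjacency list in one scan over the consecutive pairs; it trades A's O(n) for O(n*k) in exchange for building each adjacency list wholesale.
import Mathlib
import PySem

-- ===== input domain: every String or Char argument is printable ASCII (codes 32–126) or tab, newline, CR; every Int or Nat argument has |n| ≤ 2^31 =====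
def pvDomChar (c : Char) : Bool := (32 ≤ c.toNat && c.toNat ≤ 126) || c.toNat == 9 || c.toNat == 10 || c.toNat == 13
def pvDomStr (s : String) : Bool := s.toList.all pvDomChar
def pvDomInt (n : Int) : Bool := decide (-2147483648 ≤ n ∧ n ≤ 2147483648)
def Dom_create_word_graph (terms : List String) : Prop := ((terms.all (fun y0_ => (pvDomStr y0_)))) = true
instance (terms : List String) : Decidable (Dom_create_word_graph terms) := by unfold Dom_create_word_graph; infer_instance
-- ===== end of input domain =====

-- B replaces A's edge-centric single pass (one dict mutation per consecutive pair, both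
-- directions appended as it goes) with a key-centric construction: dedupe the words in
-- first-occurrence order, then build each distinct word's whole adjacency list in one scan
-- over the consecutive pairs — an alternative algorithm, proved to return the identical dict.

-- ===== PORT A =====
-- A's dict is a PySem.Dict built by the loop over range(len(terms)-1); the returned value is its items list.
-- terms[i] / terms[i+1] are always in range for i ∈ range(len(terms)-1), so pyGetD's default is never used.
def create_word_graph (terms : List String) : List (String × List String) :=
  ((PySem.List.pyRange 0 ((terms.length : Int) - 1)).foldl (fun d i =>
      let term1 := PySem.List.pyGetD terms i "";
      let term2 := PySem.List.pyGetD terms (i + 1) "";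
      let d := if d.contains term1 then d else d.insert term1 [];      -- if term1 not in word_graph: … = []
      let d := if d.contains term2 then d else d.insert term2 [];      -- if term2 not in word_graph: … = []
      let d := d.modify term1 [] (fun l => l ++ [term2]);              -- word_graph[term1].append(term2)
      d.modify term2 [] (fun l => l ++ [term1]))                        -- word_graph[term2].append(term1)
    PySem.Dict.empty).items

-- ===== PORT B =====
-- dict.fromkeys(terms) (ordered dedup) is PySem.List.dedup; zip(terms, terms[1:]) is
-- List.zip of terms with the slice terms[1:]; each nbrs.append is '++ [x]'.
def create_word_graph_alt (terms : List String) : List (String × List String) :=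
  if terms.length < 2 then []
  else
    ((PySem.List.dedup terms).foldl (fun g w =>
        g.insert w ((terms.zip (PySem.List.slice terms (some 1) none)).foldl (fun nbrs p =>
            let nbrs := if p.1 == w then nbrs ++ [p.2] else nbrs;       -- if a == w: nbrs.append(b)
            if p.2 == w then nbrs ++ [p.1] else nbrs) []))              -- if b == w: nbrs.append(a)
      PySem.Dict.empty).items

-- ===== PRECONDITION & SPEC =====
def Spec_create_word_graph (terms : List String) (out : List (String × List String)) : Prop := out = create_word_graph_alt terms
instance (terms : List String) (out : List (String × List String)) : Decidable (Spec_create_word_graph terms out) := by unfold Spec_create_word_graph; infer_instance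

-- ===== CLAIM (what is proved, stated in full; the proofs are below) =====
def Claim_equal_create_word_graph : Prop := ∀ (terms : List String), Dom_create_word_graph terms → Spec_create_word_graph terms (create_word_graph terms)

-- ===== LEMMAS AND PROOFS =====

-- the one dict operation A's loop is made of: append v to u's adjacency list (creating it if absent)
def pvApp (d : PySem.Dict String (List String)) (u v : String) : PySem.Dict String (List String) :=
  d.modify u [] (fun l => l ++ [v])

-- the append sequence A performs: for each consecutive pair (u, v), append v to u then u to v
def pvOps : List String → List (String × String)
  | u :: v :: rest => (u, v) :: (v, u) :: pvOps (v :: rest)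
  | _ => []

def pvOpsFold (d : PySem.Dict String (List String)) (l : List (String × String)) : PySem.Dict String (List String) :=
  l.foldl (fun d p => d.modify p.1 [] (fun x => x ++ [p.2])) d

def pvEnsure (d : PySem.Dict String (List String)) (k : String) : PySem.Dict String (List String) :=
  if d.contains k then d else d.insert k []

-- one iteration of A's loop on the pair (u, v)
def pvStepA (d : PySem.Dict String (List String)) (u v : String) : PySem.Dict String (List String) :=
  ((pvEnsure (pvEnsure d u) v).modify u [] (fun l => l ++ [v])).modify v [] (fun l => l ++ [u])

-- A's loop, pair-recursively
def pvPairs : PySem.Dict String (List String) → List String → PySem.Dict String (List String)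
  | d, u :: v :: rest => pvPairs (pvStepA d u v) (v :: rest)
  | d, _ => d

-- B's per-key adjacency list, pair-recursively
def pvNbrs (w : String) : List String → List String
  | u :: v :: rest =>
      ((if u == w then [v] else []) ++ (if v == w then [u] else [])) ++ pvNbrs w (v :: rest)
  | _ => []

lemma pvEnsure_contains_self (d : PySem.Dict String (List String)) (k : String) :
    (pvEnsure d k).contains k = true := by
  unfold pvEnsure
  by_cases h : d.contains k = true
  · simp [h]
  · simp [Bool.not_eq_true] at h
    simp [h, PySem.Dict.contains_insert_self]

lemma pvEnsure_of_contains (d : PySem.Dict String (List String)) {k : String}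
    (h : d.contains k = true) : pvEnsure d k = d := by
  unfold pvEnsure; simp [h]

lemma pvEnsure_modify (d : PySem.Dict String (List String)) (k : String) (f : List String → List String) :
    (pvEnsure d k).modify k [] f = d.modify k [] f := by
  unfold pvEnsure
  by_cases h : d.contains k = true
  · simp [h]
  · simp only [Bool.not_eq_true] at h
    simp only [h, Bool.false_eq_true, if_false]
    unfold PySem.Dict.modify
    rw [PySem.Dict.getD_insert_self, PySem.Dict.insert_insert_self,
      PySem.Dict.getD_of_not_contains d _ h]

lemma pvEnsure_modify_comm (d : PySem.Dict String (List String)) (u v : String)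
    (f : List String → List String) (hu : d.contains u = true) (hvu : v ≠ u) :
    (pvEnsure d v).modify u [] f = pvEnsure (d.modify u [] f) v := by
  unfold pvEnsure
  by_cases hv : d.contains v = true
  · have h2 : (d.modify u [] f).contains v = true := by
      unfold PySem.Dict.modify
      rw [PySem.Dict.contains_insert]
      simp [hv]
    simp [hv, h2]
  · simp only [Bool.not_eq_true] at hv
    have h2 : (d.modify u [] f).contains v = false := by
      unfold PySem.Dict.modify
      rw [PySem.Dict.contains_insert]
      simp [hv, hvu]
    simp only [hv, h2, Bool.false_eq_true, if_false]
    unfold PySem.Dict.modify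
    rw [PySem.Dict.getD_insert_of_ne d _ _ (Ne.symm hvu)]
    apply PySem.Dict.ext
    have hcu : (d.insert v ([] : List String)).contains u = true := by
      rw [PySem.Dict.contains_insert]
      simp [hu]
    have hcv : (d.insert u (f (d.getD u []))).contains v = false := by
      rw [PySem.Dict.contains_insert]
      simp [hv, hvu]
    rw [PySem.Dict.items_insert_of_contains _ _ hcu,
      PySem.Dict.items_insert_of_not_contains _ _ hv,
      PySem.Dict.items_insert_of_not_contains _ _ hcv,
      PySem.Dict.items_insert_of_contains _ _ hu]
    simp [List.map_append, hvu]

lemma pvStepA_eq (d : PySem.Dict String (List String)) (u v : String) :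
    pvStepA d u v = pvApp (pvApp d u v) v u := by
  unfold pvStepA pvApp
  by_cases huv : v = u
  · subst huv
    rw [pvEnsure_of_contains _ (pvEnsure_contains_self d v), pvEnsure_modify]
  · rw [pvEnsure_modify_comm (pvEnsure d u) u v _ (pvEnsure_contains_self d u) huv,
      pvEnsure_modify, pvEnsure_modify]

lemma pvPairs_eq_ops : ∀ (t : List String) (d : PySem.Dict String (List String)),
    pvPairs d t = pvOpsFold d (pvOps t)
  | [], d => by simp [pvPairs, pvOps, pvOpsFold]
  | [u], d => by simp [pvPairs, pvOps, pvOpsFold]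
  | u :: v :: rest, d => by
    rw [show pvPairs d (u :: v :: rest) = pvPairs (pvStepA d u v) (v :: rest) from rfl,
      pvPairs_eq_ops (v :: rest) (pvStepA d u v), pvStepA_eq]
    simp [pvOps, pvOpsFold, pvApp, List.foldl]

-- index facts
lemma pvRange_shift (m : Int) : PySem.List.pyRange 1 (m + 1) = (PySem.List.pyRange 0 m).map (· + 1) := by
  unfold PySem.List.pyRange
  simp only [if_neg (one_ne_zero), List.map_map]
  have h1 : m + 1 - 1 + 1 - 1 = m - 0 + 1 - 1 := by ring
  have h2 : (1 : Int) < m + 1 ↔ (0 : Int) < m := by omega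
  simp only [h1, h2]
  by_cases hm : (0 : Int) < m
  · simp only [hm, if_true]
    apply List.map_congr_left
    intro k _
    simp; ring
  · simp [hm]

lemma pvGetD_cons_shift (x : String) (xs : List String) (i : Int) (h : 0 ≤ i) (c : String) :
    PySem.List.pyGetD (x :: xs) (i + 1) c = PySem.List.pyGetD xs i c := by
  rw [PySem.List.pyGetD_of_nonneg _ _ (by omega), PySem.List.pyGetD_of_nonneg _ _ h]
  have ht : (i + 1).toNat = i.toNat + 1 := by omega
  simp [ht]

lemma pvA_fold : ∀ (t : List String) (d : PySem.Dict String (List String)),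
    (PySem.List.pyRange 0 ((t.length : Int) - 1)).foldl (fun d i =>
      let term1 := PySem.List.pyGetD t i "";
      let term2 := PySem.List.pyGetD t (i + 1) "";
      let d := if d.contains term1 then d else d.insert term1 [];
      let d := if d.contains term2 then d else d.insert term2 [];
      let d := d.modify term1 [] (fun l => l ++ [term2]);
      d.modify term2 [] (fun l => l ++ [term1])) d = pvPairs d t
  | [], d => by simp [pvPairs]
  | [u], d => by simp [pvPairs]
  | u :: v :: rest, d => by
    have hlen : ((u :: v :: rest).length : Int) - 1 = (rest.length : Int) + 1 := by
      push_cast [List.length_cons]; ring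
    rw [hlen, PySem.List.pyRange_one_cons (by positivity), List.foldl_cons]
    simp only [zero_add]
    rw [pvRange_shift, List.foldl_map]
    have hb : ∀ (d' : PySem.Dict String (List String)), ∀ i ∈ PySem.List.pyRange 0 (rest.length : Int),
        (fun d (i : Int) =>
          let term1 := PySem.List.pyGetD (u :: v :: rest) i "";
          let term2 := PySem.List.pyGetD (u :: v :: rest) (i + 1) "";
          let d := if d.contains term1 then d else d.insert term1 [];
          let d := if d.contains term2 then d else d.insert term2 [];
          let d := d.modify term1 [] (fun l => l ++ [term2]);
          d.modify term2 [] (fun l => l ++ [term1])) d' (i + 1) =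
        (fun d (i : Int) =>
          let term1 := PySem.List.pyGetD (v :: rest) i "";
          let term2 := PySem.List.pyGetD (v :: rest) (i + 1) "";
          let d := if d.contains term1 then d else d.insert term1 [];
          let d := if d.contains term2 then d else d.insert term2 [];
          let d := d.modify term1 [] (fun l => l ++ [term2]);
          d.modify term2 [] (fun l => l ++ [term1])) d' i := by
      intro d' i hi
      rw [PySem.List.mem_pyRange_one] at hi
      simp only
      rw [pvGetD_cons_shift u _ i hi.1, pvGetD_cons_shift u _ (i + 1) (by omega)]
    rw [PySem.List.foldl_congr_mem _ _ _ _ hb,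
      show pvPairs d (u :: v :: rest) = pvPairs (pvStepA d u v) (v :: rest) from rfl,
      ← pvA_fold (v :: rest) (pvStepA d u v),
      show ((v :: rest).length : Int) - 1 = (rest.length : Int) by push_cast [List.length_cons]; ring]
    congr 1
    have g0 : PySem.List.pyGetD (u :: v :: rest) (0 : Int) "" = u := by
      rw [PySem.List.pyGetD_of_nonneg _ _ le_rfl]; rfl
    have g1 : PySem.List.pyGetD (u :: v :: rest) (1 : Int) "" = v := by
      rw [PySem.List.pyGetD_of_nonneg _ _ (by omega)]; rfl
    simp only [g0, g1]
    rfl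

lemma pvA_eq_ops (terms : List String) :
    create_word_graph terms = (pvOpsFold PySem.Dict.empty (pvOps terms)).items := by
  unfold create_word_graph
  rw [pvA_fold, pvPairs_eq_ops]

-- filtering A's op stream by key w gives exactly B's per-key neighbour list
lemma pvFilter_ops (w : String) : ∀ (t : List String),
    ((pvOps t).filter (fun p => p.1 == w)).map (fun x => x.2) = pvNbrs w t
  | [] => rfl
  | [u] => rfl
  | u :: v :: rest => by
    rw [show pvOps (u :: v :: rest) = (u, v) :: (v, u) :: pvOps (v :: rest) from rfl]
    by_cases hu : u == w <;> by_cases hv : v == w <;>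
      simp [pvNbrs, hu, hv, pvFilter_ops w (v :: rest)]

-- B's inner zip loop computes pvNbrs
lemma pvZip_fold (w : String) : ∀ (t : List String) (acc : List String),
    (t.zip (t.drop 1)).foldl (fun nbrs p =>
        let nbrs := if p.1 == w then nbrs ++ [p.2] else nbrs;
        if p.2 == w then nbrs ++ [p.1] else nbrs) acc = acc ++ pvNbrs w t
  | [], acc => by simp [pvNbrs]
  | [u], acc => by simp [pvNbrs]
  | u :: v :: rest, acc => by
    rw [show (u :: v :: rest).zip ((u :: v :: rest).drop 1) =
        (u, v) :: ((v :: rest).zip ((v :: rest).drop 1)) from rfl,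
      List.foldl_cons, pvZip_fold w (v :: rest)]
    by_cases hu : u == w <;> by_cases hv : v == w <;>
      simp [pvNbrs, hu, hv, List.append_assoc]

-- the keys of A's op stream, as a set, are the distinct words (once there is at least one pair)
lemma pvKeys_aux (v : String) : ∀ (rest : List String) (s : PySem.Set String), v ∈ s →
    PySem.Set.update s ((pvOps (v :: rest)).map Prod.fst) = PySem.Set.update s (v :: rest)
  | [], s, hv => by
    simp [pvOps, PySem.Set.update_nil, PySem.Set.update_cons, PySem.Set.add_of_mem hv]
  | w :: rest', s, hv => by
    rw [show pvOps (v :: w :: rest') = (v, w) :: (w, v) :: pvOps (w :: rest') from rfl]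
    simp only [List.map_cons]
    rw [PySem.Set.update_cons, PySem.Set.update_cons, PySem.Set.add_of_mem hv,
      pvKeys_aux w rest' (PySem.Set.add s w) ((PySem.Set.mem_add s w w).mpr (Or.inr rfl)),
      PySem.Set.update_cons, PySem.Set.update_cons, PySem.Set.update_cons,
      PySem.Set.add_of_mem hv, PySem.Set.add_of_mem ((PySem.Set.mem_add s w w).mpr (Or.inr rfl))]

lemma pvKeys_ops (u v : String) (rest : List String) :
    PySem.Set.ofList ((pvOps (u :: v :: rest)).map Prod.fst) = PySem.Set.ofList (u :: v :: rest) := by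
  rw [show pvOps (u :: v :: rest) = (u, v) :: (v, u) :: pvOps (v :: rest) from rfl]
  simp only [List.map_cons]
  rw [PySem.Set.ofList_cons_eq_update, PySem.Set.update_cons,
    pvKeys_aux v (rest) _ ((PySem.Set.mem_add _ v v).mpr (Or.inr rfl)),
    PySem.Set.ofList_cons_eq_update, PySem.Set.update_cons,
    PySem.Set.add_of_mem ((PySem.Set.mem_add ([u] : PySem.Set String) v v).mpr (Or.inr rfl)),
    PySem.Set.update_cons]

lemma pvMain (terms : List String) : create_word_graph terms = create_word_graph_alt terms := by
  match terms with
  | [] => rfl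
  | [x] =>
    rw [show create_word_graph [x] = (PySem.Dict.empty : PySem.Dict String (List String)).items from rfl]
    rfl
  | u :: v :: rest =>
    have hlen : ¬ ((u :: v :: rest).length < 2) := by simp [List.length_cons]
    rw [pvA_eq_ops, create_word_graph_alt, if_neg hlen]
    -- A's side: items of a modify-fold = distinct keys mapped to their filtered op values
    have hnd : (pvOpsFold PySem.Dict.empty (pvOps (u :: v :: rest))).keys.Nodup := by
      unfold pvOpsFold
      exact PySem.Dict.nodup_keys_foldl_modify_key _ Prod.fst []
        (fun _ p => fun x => x ++ [p.2]) _ (by simp)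
    rw [PySem.Dict.items_eq_map_keys _ hnd []]
    have hkeys : (pvOpsFold PySem.Dict.empty (pvOps (u :: v :: rest))).keys
        = PySem.List.dedup (u :: v :: rest) := by
      unfold pvOpsFold
      rw [PySem.Dict.keys_foldl_modify_key _ Prod.fst [] (fun _ p => fun x => x ++ [p.2])]
      rw [show (PySem.Dict.empty : PySem.Dict String (List String)).keys = [] from rfl]
      rw [show (PySem.Set.update ([] : PySem.Set String)
            ((pvOps (u :: v :: rest)).map Prod.fst))
          = PySem.Set.ofList ((pvOps (u :: v :: rest)).map Prod.fst) from rfl]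
      rw [pvKeys_ops, PySem.List.dedup_eq_ofList]
    -- B's side: items of an insert-fold over the fresh distinct keys
    have hfresh : ∀ a ∈ PySem.List.dedup (u :: v :: rest),
        (PySem.Dict.empty : PySem.Dict String (List String)).contains a = false := by
      intro a _; rfl
    have hbnd : ((PySem.List.dedup (u :: v :: rest)).map (fun a => a)).Nodup := by
      rw [List.map_id', PySem.List.dedup_eq_ofList]
      exact PySem.Set.nodup_ofList _
    rw [PySem.Dict.items_foldl_insert_fresh _ (fun a => a)
      (fun w => (((u :: v :: rest).zip (PySem.List.slice (u :: v :: rest) (some 1) none)).foldl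
        (fun nbrs p =>
          let nbrs := if p.1 == w then nbrs ++ [p.2] else nbrs;
          if p.2 == w then nbrs ++ [p.1] else nbrs) [])) _ hfresh hbnd]
    rw [show ((PySem.Dict.empty : PySem.Dict String (List String)).items) = [] from rfl,
      List.nil_append, hkeys]
    apply List.map_congr_left
    intro k _
    have hg : (pvOpsFold PySem.Dict.empty (pvOps (u :: v :: rest))).getD k []
        = pvNbrs k (u :: v :: rest) := by
      unfold pvOpsFold
      rw [PySem.Dict.getD_foldl_modify_append, pvFilter_ops]
      rfl
    rw [hg, PySem.List.slice_from _ (by omega :(0:Int) ≤ 1),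
      show ((1 : Int)).toNat = 1 from rfl, pvZip_fold, List.nil_append]

-- ===== VERDICT (by name: the statement is the Claim_ definition above) =====
theorem create_word_graph_spec : Claim_equal_create_word_graph := by
  intro terms _
  unfold Spec_create_word_graph
  exact pvMain terms
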